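-- pv_equiv track=rewrite | github.com/google/filament | third_party/dawn/third_party/dxc/utils/hct/hctdb_instrhelp.py | build_range_code
-- ===== SOURCE A (Python) =====
-- def build_range_tuples(i):
--     "Produces a list of tuples with contiguous ranges in the input list."
--     i = sorted(i)
--     low_bound = None
--     high_bound = None
--     for val in i:
--         if low_bound is None:
--             low_bound = val
--             high_bound = val
--         else:
--             assert not high_bound is None
--             if val == high_bound + 1:
--                 high_bound = val
--             else:
--                 yield (low_bound, high_bound)
--                 low_bound = val
--                 high_bound = val
--     if not low_bound is None:
--         yield (low_bound, high_bound)
--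
-- def build_range_code(var, i):
--     "Produces a fragment of code that tests whether the variable name matches values in the given range."
--     ranges = build_range_tuples(i)
--     result = ""
--     for r in ranges:
--         if r[0] == r[1]:
--             cond = var + " == " + str(r[0])
--         else:
--             cond = "(%d <= %s && %s <= %d)" % (r[0], var, var, r[1])
--         if result == "":
--             result = cond
--         else:
--             result = result + " || " + cond
--     return result
-- ===== SOURCE B (Python) =====
-- from itertools import groupby
--
-- def build_range_code(var, i):
--     "Produces a fragment of code that tests whether the variable name matches values in the given range."
--     frags = []
--     for _, grp in groupby(enumerate(sorted(i)), key=lambda p: p[1] - p[0]):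
--         g = list(grp)
--         low, high = g[0][1], g[-1][1]
--         frags.append(var + " == " + str(low) if low == high
--                      else "(%d <= %s && %s <= %d)" % (low, var, var, high))
--     return " || ".join(frags)
-- ===== Notes on version B (the rewrite author's own statement) =====
-- stated objective: faster
-- what changed: Replaces A's explicit low_bound/high_bound state machine (generator yielding tuples, then a fold that grows the result by repeated string concatenation) by grouping enumerate(sorted(i)) with itertools.groupby on the invariant key value-index, taking each group's first and last value and ' || '.join-ing the fragments once.
import Mathlib
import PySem

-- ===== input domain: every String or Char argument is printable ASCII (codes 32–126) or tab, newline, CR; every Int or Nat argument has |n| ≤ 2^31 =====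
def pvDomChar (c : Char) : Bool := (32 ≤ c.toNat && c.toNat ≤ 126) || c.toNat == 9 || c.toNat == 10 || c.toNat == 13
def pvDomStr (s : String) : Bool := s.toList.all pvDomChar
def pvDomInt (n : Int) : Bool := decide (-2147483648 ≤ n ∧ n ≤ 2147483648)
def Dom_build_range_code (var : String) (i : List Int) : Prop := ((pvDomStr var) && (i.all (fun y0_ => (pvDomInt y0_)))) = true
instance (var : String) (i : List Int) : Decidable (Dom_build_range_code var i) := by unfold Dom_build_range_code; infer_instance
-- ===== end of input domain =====

-- B groups enumerate(sorted(i)) by the invariant value-index (itertools.groupby style) and joins the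
-- fragments once, instead of A's low/high state machine with quadratic repeated string concatenation.


-- ===== PORT A =====
-- state = (low_bound, high_bound, tuples yielded so far); the generator's yields are accumulated in order.
def brt_step (st : Option Int × Option Int × List (Int × Int)) (val : Int) :
    Option Int × Option Int × List (Int × Int) :=
  match st with
  | (none, _, out) => (some val, some val, out)
  | (some lb, hb, out) =>
      let hi := hb.getD 0  -- 'assert not high_bound is None': hb is always some here
      if val = hi + 1 then (some lb, some val, out)
      else (some val, some val, out ++ [(lb, hi)])

def build_range_tuples (i : List Int) : List (Int × Int) :=
  let s := PySem.List.sorted i (fun x => x) false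
  match s.foldl brt_step (none, none, ([] : List (Int × Int))) with
  | (none, _, out) => out
  | (some lb, hb, out) => out ++ [(lb, hb.getD 0)]

def build_range_code (var : String) (i : List Int) : String :=
  (build_range_tuples i).foldl (fun result r =>
    let cond := if r.1 = r.2 then var ++ " == " ++ PySem.Int.toStr r.1
      else "(" ++ PySem.Int.toStr r.1 ++ " <= " ++ var ++ " && " ++ var ++ " <= " ++ PySem.Int.toStr r.2 ++ ")"
    if result = "" then cond else result ++ " || " ++ cond) ""

-- ===== PORT B =====
-- itertools.groupby(pairs, key = p.2 - p.1): maximal runs of adjacent pairs with equal key.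
def pvGroupGo (cur : List (Int × Int)) (k : Int) : List (Int × Int) → List (List (Int × Int))
  | [] => [cur.reverse]
  | p :: ps =>
      if p.2 - p.1 = k then pvGroupGo (p :: cur) k ps
      else cur.reverse :: pvGroupGo [p] (p.2 - p.1) ps

def pvGroupby : List (Int × Int) → List (List (Int × Int))
  | [] => []
  | p :: ps => pvGroupGo [p] (p.2 - p.1) ps

def pvFrag (var : String) (lo hi : Int) : String :=
  if lo = hi then var ++ " == " ++ PySem.Int.toStr lo
  else "(" ++ PySem.Int.toStr lo ++ " <= " ++ var ++ " && " ++ var ++ " <= " ++ PySem.Int.toStr hi ++ ")"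

def build_range_code_alt (var : String) (i : List Int) : String :=
  let groups := pvGroupby (PySem.List.enumerate (PySem.List.sorted i (fun x => x) false) 0)
  -- groups are nonempty, so g[0] / g[-1] never raise; ported with .getD
  PySem.Str.join " || " (groups.map (fun g =>
    pvFrag var (g.head?.getD (0, 0)).2 (g.getLast?.getD (0, 0)).2))

-- ===== PRECONDITION & SPEC =====
def Spec_build_range_code (var : String) (i : List Int) (out : String) : Prop := out = build_range_code_alt var i
instance (var : String) (i : List Int) (out : String) : Decidable (Spec_build_range_code var i out) := by unfold Spec_build_range_code; infer_instance

-- ===== CLAIM (what is proved, stated in full; the proofs are below) =====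
def Claim_equal_build_range_code : Prop := ∀ (var : String) (i : List Int), Dom_build_range_code var i → Spec_build_range_code var i (build_range_code var i)

-- ===== LEMMAS AND PROOFS =====

-- Canonical description of the contiguous runs of a list (as A's state machine scans it).
def runsGo (lo hi : Int) : List Int → List (Int × Int)
  | [] => [(lo, hi)]
  | v :: rest => if v = hi + 1 then runsGo lo v rest else (lo, hi) :: runsGo v v rest

def runs : List Int → List (Int × Int)
  | [] => []
  | v :: rest => runsGo v v rest

-- A's loop body, named (definitionally equal to the inline lambda of the port)
def stepA (var result : String) (r : Int × Int) : String :=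
  if result = "" then pvFrag var r.1 r.2 else result ++ " || " ++ pvFrag var r.1 r.2

lemma code_eq_fold_stepA (var : String) (i : List Int) :
    build_range_code var i = (build_range_tuples i).foldl (stepA var) "" := rfl

lemma brt_fold (s : List Int) : ∀ (lo hi : Int) (out : List (Int × Int)),
    (match s.foldl brt_step (some lo, some hi, out) with
     | (none, _, o) => o
     | (some lb, hb, o) => o ++ [(lb, hb.getD 0)]) = out ++ runsGo lo hi s := by
  induction s with
  | nil => intro lo hi out; simp [runsGo]
  | cons v rest ih =>
      intro lo hi out
      simp only [List.foldl_cons, brt_step, runsGo]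
      by_cases h : v = hi + 1
      · simp [h, ih]
      · simp [h, ih]

lemma tuples_eq_runs (i : List Int) :
    build_range_tuples i = runs (PySem.List.sorted i (fun x => x) false) := by
  unfold build_range_tuples
  cases h : PySem.List.sorted i (fun x => x) false with
  | nil => simp [runs]
  | cons v rest =>
      simp only [runs, List.foldl_cons, brt_step]
      exact brt_fold rest v v []

lemma pvFrag_ne_empty (var : String) (lo hi : Int) : pvFrag var lo hi ≠ "" := by
  unfold pvFrag
  split <;>
  · intro h
    have := congrArg String.toList h
    simp [String.toList_append] at this

-- the separator-prefixed tail of a join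
def sepcat : List String → String
  | [] => ""
  | c :: l => " || " ++ c ++ sepcat l

lemma join_eq_sepcat (c : String) : ∀ (l : List String),
    PySem.Str.join " || " (c :: l) = c ++ sepcat l := by
  intro l
  induction l generalizing c with
  | nil =>
      apply String.toList_inj.mp
      simp [PySem.Str.toList_join, PySem.Chars.join_singleton, sepcat]
  | cons d l ih =>
      apply String.toList_inj.mp
      have h1 := congrArg String.toList (ih (c := d))
      simp only [PySem.Str.toList_join, List.map_cons, String.toList_append, sepcat] at h1 ⊢
      rw [PySem.Chars.join_cons_cons, h1]
      simp [String.toList_append]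

lemma ne_empty_append (a b : String) (h : b ≠ "") : a ++ b ≠ "" := by
  intro hc
  apply h
  have := congrArg String.toList hc
  simp at this
  exact String.toList_inj.mp (by simp [this.2])

lemma getLast?_cons_ne {α : Type} (a : α) (l : List α) (h : l ≠ []) :
    (a :: l).getLast? = l.getLast? := by
  cases l with
  | nil => exact absurd rfl h
  | cons b t => simp [List.getLast?_cons_cons]

lemma foldA_sepcat (var : String) : ∀ (ts : List (Int × Int)) (res : String), res ≠ "" →
    ts.foldl (stepA var) res = res ++ sepcat (ts.map (fun r => pvFrag var r.1 r.2)) := by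
  intro ts
  induction ts with
  | nil =>
      intro res h
      apply String.toList_inj.mp
      simp [sepcat]
  | cons t ts ih =>
      intro res h
      rw [List.foldl_cons, show stepA var res t = res ++ " || " ++ pvFrag var t.1 t.2 from if_neg h]
      rw [ih _ (ne_empty_append _ _ (pvFrag_ne_empty var t.1 t.2))]
      apply String.toList_inj.mp
      simp [sepcat]

lemma fold_eq_join (var : String) (ts : List (Int × Int)) :
    ts.foldl (stepA var) "" = PySem.Str.join " || " (ts.map (fun r => pvFrag var r.1 r.2)) := by
  cases ts with
  | nil =>
      apply String.toList_inj.mp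
      simp [PySem.Str.toList_join, PySem.Chars.join_nil]
  | cons t ts =>
      rw [List.foldl_cons, show stepA var "" t = pvFrag var t.1 t.2 from if_pos rfl,
          List.map_cons, join_eq_sepcat]
      exact foldA_sepcat var ts _ (pvFrag_ne_empty var t.1 t.2)

lemma groupGo_runs (var : String) : ∀ (rest : List Int) (n lo hi : Int) (cur : List (Int × Int)),
    cur.head? = some (n - 1, hi) → (cur.getLast?.getD (0, 0)).2 = lo →
    (pvGroupGo cur (hi - (n - 1)) (PySem.List.enumerate rest n)).map
      (fun g => pvFrag var (g.head?.getD (0, 0)).2 (g.getLast?.getD (0, 0)).2)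
    = (runsGo lo hi rest).map (fun r => pvFrag var r.1 r.2) := by
  intro rest
  induction rest with
  | nil =>
      intro n lo hi cur hh hl
      simp only [PySem.List.enumerate, pvGroupGo, runsGo, List.map_cons, List.map_nil]
      rw [List.head?_reverse, List.getLast?_reverse, hh, hl]
      rfl
  | cons v rest ih =>
      intro n lo hi cur hh hl
      have hne : cur ≠ [] := by intro hc; simp [hc] at hh
      rw [PySem.List.enumerate_cons]
      simp only [pvGroupGo, runsGo]
      by_cases h : v = hi + 1
      · have hk : (v : Int) - n = hi - (n - 1) := by omega
        rw [if_pos hk]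
        have hk2 : hi - (n - 1) = v - (n + 1 - 1) := by omega
        rw [hk2, if_pos h]
        apply ih (n + 1) lo v ((n, v) :: cur)
        · simp only [List.head?_cons]
          congr 2
          omega
        · rw [getLast?_cons_ne _ _ hne]; exact hl
      · have hk : ¬ ((v : Int) - n = hi - (n - 1)) := by omega
        rw [if_neg hk, if_neg h]
        simp only [List.map_cons]
        rw [List.head?_reverse, List.getLast?_reverse, hh, hl]
        have hk2 : (v : Int) - n = v - (n + 1 - 1) := by omega
        rw [hk2]
        have h2 := ih (n + 1) v v [(n, v)] (by simp only [List.head?_cons]; congr 2; omega) rfl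
        rw [h2]
        rfl
  
lemma alt_eq_join_runs (var : String) (i : List Int) :
    build_range_code_alt var i
    = PySem.Str.join " || "
        ((runs (PySem.List.sorted i (fun x => x) false)).map (fun r => pvFrag var r.1 r.2)) := by
  unfold build_range_code_alt
  cases h : PySem.List.sorted i (fun x => x) false with
  | nil => simp [pvGroupby, runs, PySem.List.enumerate]
  | cons v rest =>
      rw [PySem.List.enumerate_cons]
      simp only [pvGroupby, runs]
      congr 1
      have h2 := groupGo_runs var rest 1 v v [(0, v)] (by norm_num) rfl
      norm_num at h2 ⊢
      exact h2

-- ===== VERDICT (by name: the statement is the Claim_ definition above) =====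
theorem build_range_code_spec : Claim_equal_build_range_code := by
  intro var i _
  unfold Spec_build_range_code
  rw [code_eq_fold_stepA, tuples_eq_runs, fold_eq_join, alt_eq_join_runs]
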